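-- pv_equiv track=rewrite | github.com/heyazoo1007/Algorithm | Programmers/77885.py | solution
-- ===== SOURCE A (Python) =====
-- def solution(numbers):
--     answer = []
--
--     for number in numbers:
--         bin_number = list('0' + bin(number)[2 : ])
--         index = ''.join(bin_number).rfind('0') #가장 오른쪽에 있는 0의 인덱스
--         bin_number[index] = '1'
--
--         if number % 2 == 1:
--             bin_number[index + 1] = '0'
--
--         #2진수를 10진수로 변환해서 추가
--         answer.append(int(''.join(bin_number), 2))
--
--     return answer
-- ===== SOURCE B (Python) =====
-- def _next_val(number):
--     # next value with at most 2 differing bits, computed arithmetically: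
--     # even -> flip the last bit; odd -> flip the lowest zero bit and clear the one below it
--     if number % 2 == 0:
--         return number + 1
--     low0 = ~number & (number + 1)   # lowest zero bit of number
--     return number + low0 - low0 // 2
--
--
-- def solution(numbers):
--     return [_next_val(number) for number in numbers]
-- ===== Notes on version B (the rewrite author's own statement) =====
-- stated objective: simpler
-- what changed: Replaces A's binary-string construction (bin(), list of chars, rfind, two in-place character writes, int(...,2) re-parse) with a two-line arithmetic computation per element: even numbers map to n+1, odd numbers flip the lowest zero bit and clear the bit below it via low0 = ~n & (n+1).
-- outside the precondition, e.g. on solution([-1]): A returns [5], B returns [-1]; on solution([-4]): A returns [5], B returns [-3]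
import Mathlib
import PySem

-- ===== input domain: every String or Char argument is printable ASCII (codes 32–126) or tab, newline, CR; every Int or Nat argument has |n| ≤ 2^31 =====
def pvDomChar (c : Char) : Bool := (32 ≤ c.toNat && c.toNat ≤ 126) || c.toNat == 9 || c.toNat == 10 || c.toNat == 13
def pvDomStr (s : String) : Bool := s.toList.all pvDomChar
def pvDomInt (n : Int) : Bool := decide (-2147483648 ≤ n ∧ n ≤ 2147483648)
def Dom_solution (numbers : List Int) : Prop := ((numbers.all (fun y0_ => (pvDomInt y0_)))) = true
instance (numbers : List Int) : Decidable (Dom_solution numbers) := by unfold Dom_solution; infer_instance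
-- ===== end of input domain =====

-- B replaces A's binary-string surgery (bin/rfind/char writes/int(..,2)) with per-element bit
-- arithmetic; equivalence is claimed on the task's natural domain of non-negative numbers.

-- ===== PORT A =====
-- int(''.join(bin_number), 2), ported by hand: exact on nonempty strings of '0'/'1' digits
-- (no sign/whitespace/'0b' prefix/underscore) — the only strings A builds under Pre_solution.
def intFromBin2 (cs : List Char) : Int :=
  cs.foldl (fun acc c => 2 * acc + (if c == '1' then 1 else 0)) 0

def solutionBody (answer : List Int) (number : Int) : List Int :=
  let bin_number : List Char := '0' :: PySem.List.slice (PySem.Int.toBinChars0b number) (some 2) none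
  let index : Int := PySem.Chars.rfind bin_number ['0']
  let bin_number2 : List Char := PySem.List.pySetD bin_number index '1'
  let bin_number3 : List Char :=
    if PySem.Int.mod number 2 == 1 then PySem.List.pySetD bin_number2 (index + 1) '0' else bin_number2
  answer ++ [intFromBin2 bin_number3]

def solution (numbers : List Int) : List Int := numbers.foldl solutionBody []

-- ===== PORT B =====
def nextVal (number : Int) : Int :=
  if PySem.Int.mod number 2 == 0 then number + 1
  else
    let low0 := PySem.Int.band (Int.not number) (number + 1)
    number + low0 - PySem.Int.floordiv low0 2

def solution_alt (numbers : List Int) : List Int := numbers.map nextVal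

-- ===== PRECONDITION & SPEC =====
-- Pre_ restricts to the task's natural domain (Programmers 77885: non-negative numbers): on a list
-- with a negative element A still returns, but its value is an accident of string mangling (the
-- '0b' prefix of bin() survives into int(..., 2), or the 'b' character itself gets overwritten).
def Pre_solution (numbers : List Int) : Prop := ∀ n ∈ numbers, 0 ≤ n
instance (numbers : List Int) : Decidable (Pre_solution numbers) := by unfold Pre_solution; infer_instance
def pvWitness_solution : List Int := [2, 7, 0, 1, 12]

def Spec_solution (numbers : List Int) (out : List Int) : Prop := out = solution_alt numbers
instance (numbers : List Int) (out : List Int) : Decidable (Spec_solution numbers out) := by unfold Spec_solution; infer_instance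

-- ===== CLAIM (what is proved, stated in full; the proofs are below) =====
def Claim_equal_solution : Prop := ∀ (numbers : List Int), Dom_solution numbers → Pre_solution numbers → Spec_solution numbers (solution numbers)

-- ===== LEMMAS AND PROOFS =====

-- the loop body's appended value, named for the proofs
def Aval (number : Int) : Int :=
  let bin_number : List Char := '0' :: PySem.List.slice (PySem.Int.toBinChars0b number) (some 2) none
  let index : Int := PySem.Chars.rfind bin_number ['0']
  let bin_number2 : List Char := PySem.List.pySetD bin_number index '1'
  let bin_number3 : List Char :=
    if PySem.Int.mod number 2 == 1 then PySem.List.pySetD bin_number2 (index + 1) '0' else bin_number2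
  intFromBin2 bin_number3

lemma solutionBody_eq (acc : List Int) (n : Int) : solutionBody acc n = acc ++ [Aval n] := rfl

-- binary digits of a natural number, MSB first ([] for 0)
def bits (m : ℕ) : List Char :=
  if m = 0 then [] else bits (m / 2) ++ [if m % 2 = 1 then '1' else '0']
  decreasing_by exact Nat.div_lt_self (Nat.pos_of_ne_zero (by assumption)) one_lt_two

lemma bits_pos {m : ℕ} (h : 0 < m) :
    bits m = bits (m / 2) ++ [if m % 2 = 1 then '1' else '0'] := by
  rw [bits]; simp [Nat.pos_iff_ne_zero.mp h]

lemma toDigitsCore_eq (fuel : ℕ) : ∀ m ds, 0 < m → m ≤ fuel →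
    Nat.toDigitsCore 2 fuel m ds = bits m ++ ds := by
  induction fuel with
  | zero => intro m ds h0 h; omega
  | succ f ih =>
    intro m ds h0 h
    rw [Nat.toDigitsCore]
    have hd : Nat.digitChar (m % 2) = if m % 2 = 1 then '1' else '0' := by
      rcases Nat.mod_two_eq_zero_or_one m with h2 | h2 <;> simp [h2, Nat.digitChar]
    by_cases hq : m / 2 = 0
    · have hb0 : bits 0 = [] := by rw [bits]; simp
      simp [hq, hd, bits_pos h0, hb0]
    · simp only [hq, if_false]
      rw [ih (m/2) _ (by omega) (by omega), bits_pos h0, hd]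
      simp

lemma toDigits_two (m : ℕ) : Nat.toDigits 2 m = if m = 0 then ['0'] else bits m := by
  by_cases h : m = 0
  · subst h; rfl
  · rw [Nat.toDigits, toDigitsCore_eq _ _ _ (by omega) (by omega)]
    simp [h]

lemma tail_eq (m : ℕ) :
    PySem.List.slice (PySem.Int.toBinChars0b (m : ℤ)) (some 2) none = Nat.toDigits 2 m := by
  rw [PySem.Int.toBinChars0b, if_neg (by omega),
    show ((2:ℤ)) = ((2:ℕ):ℤ) by norm_num, PySem.List.slice_from_natCast]
  simp

lemma intFromBin2_append (cs : List Char) (c : Char) :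
    intFromBin2 (cs ++ [c]) = 2 * intFromBin2 cs + (if c == '1' then 1 else 0) := by
  simp [intFromBin2, List.foldl_append]

lemma intFromBin2_cons_zero (cs : List Char) : intFromBin2 ('0' :: cs) = intFromBin2 cs := by
  simp [intFromBin2]

lemma intFromBin2_bits (m : ℕ) : intFromBin2 (bits m) = (m : ℤ) := by
  induction m using Nat.strong_induction_on with
  | _ m ih =>
    by_cases h : m = 0
    · subst h; rw [bits]; simp [intFromBin2]
    · rw [bits_pos (by omega), intFromBin2_append, ih (m/2) (by omega)]
      rcases Nat.mod_two_eq_zero_or_one m with h2 | h2 <;> simp [h2] <;> omega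

-- rfind facts (sub = ['0'])
lemma go_zero (s sub : List Char) :
    PySem.Chars.rfind.go s sub 0 = if sub.isPrefixOf s then 0 else -1 := rfl

lemma go_succ (s sub : List Char) (j : ℕ) :
    PySem.Chars.rfind.go s sub (j+1) =
      if sub.isPrefixOf (s.drop (j+1)) then ((j:ℤ)+1) else PySem.Chars.rfind.go s sub j := rfl

lemma go_le (s sub : List Char) (k : ℕ) : PySem.Chars.rfind.go s sub k ≤ (k : ℤ) := by
  induction k with
  | zero => rw [go_zero]; split <;> omega
  | succ j ih => rw [go_succ]; split <;> [omega; (push_cast; omega)]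

lemma go_nonneg (s : List Char) (hp : List.isPrefixOf ['0'] s) (k : ℕ) :
    0 ≤ PySem.Chars.rfind.go s ['0'] k := by
  induction k with
  | zero => rw [go_zero, if_pos hp]
  | succ j ih => rw [go_succ]; split <;> [(push_cast; omega); exact ih]

lemma prefix0_append_one (s : List Char) :
    List.isPrefixOf ['0'] (s ++ ['1']) = List.isPrefixOf ['0'] s := by
  cases s with
  | nil => simp [List.isPrefixOf]
  | cons c t => simp [List.isPrefixOf]

lemma go_append_one (s : List Char) (k : ℕ) (hk : k ≤ s.length) :
    PySem.Chars.rfind.go (s ++ ['1']) ['0'] k = PySem.Chars.rfind.go s ['0'] k := by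
  induction k with
  | zero => rw [go_zero, go_zero, prefix0_append_one]
  | succ j ih =>
    rw [go_succ, go_succ, List.drop_append_of_le_length hk, prefix0_append_one,
      ih (by omega)]

lemma rfind_append_one (s : List Char) :
    PySem.Chars.rfind (s ++ ['1']) ['0'] = PySem.Chars.rfind s ['0'] := by
  show PySem.Chars.rfind.go _ _ (s ++ ['1']).length = PySem.Chars.rfind.go _ _ s.length
  rw [List.length_append, List.length_singleton, go_succ,
    if_neg (by simp), go_append_one s s.length le_rfl]

lemma rfind_append_zero (s : List Char) :
    PySem.Chars.rfind (s ++ ['0']) ['0'] = (s.length : ℤ) := by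
  show PySem.Chars.rfind.go _ _ (s ++ ['0']).length = _
  rw [List.length_append, List.length_singleton, go_succ,
    if_neg (by simp)]
  cases s with
  | nil => decide
  | cons c t =>
    have h : ((c :: t) ++ ['0']).drop (t.length + 1) = ['0'] := by
      simp
    rw [List.length_cons, go_succ, h, if_pos (by decide)]
    push_cast; ring

lemma rfind_le (s : List Char) : PySem.Chars.rfind s ['0'] ≤ (s.length : ℤ) - 1 := by
  show PySem.Chars.rfind.go _ _ s.length ≤ _
  cases s with
  | nil => simp [go_zero, List.isPrefixOf]
  | cons c t =>
    rw [List.length_cons, go_succ, if_neg (by simp)]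
    have := go_le (c :: t) ['0'] t.length
    push_cast
    omega

lemma rfind_cons_zero_nonneg (t : List Char) : 0 ≤ PySem.Chars.rfind ('0' :: t) ['0'] :=
  go_nonneg _ (by simp [List.isPrefixOf]) _

-- lowest set bit, via x & (x-1)
def lowb (X : ℕ) : ℕ := X - (X &&& (X - 1))

lemma and_mod_two (x y : ℕ) : (x &&& y) % 2 = x % 2 * (y % 2) := by
  have h := Nat.testBit_land x y 0
  simp only [Nat.testBit_zero] at h
  rcases Nat.mod_two_eq_zero_or_one (x &&& y) with hz | hz <;>
  rcases Nat.mod_two_eq_zero_or_one x with hx | hx <;>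
  rcases Nat.mod_two_eq_zero_or_one y with hy | hy <;>
    simp [hx, hy, hz] at h ⊢

lemma and_rec (x y : ℕ) : x &&& y = 2 * (x / 2 &&& y / 2) + x % 2 * (y % 2) := by
  have h1 := Nat.and_div_two (a := x) (b := y)
  have h2 := and_mod_two x y
  omega

lemma and_pred_self_odd (y : ℕ) (hy : y % 2 = 1) : y &&& (y - 1) = y - 1 := by
  rw [and_rec]
  have h : y / 2 = (y - 1) / 2 := by omega
  rw [hy, h, Nat.and_self]
  omega

lemma lowb_two (X : ℕ) (h : X % 4 = 2) : lowb X = 2 := by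
  have hX : X &&& (X - 1) = 2 * (X / 2 &&& (X - 1) / 2) + X % 2 * ((X - 1) % 2) := and_rec ..
  have h2 : (X - 1) / 2 = X / 2 - 1 := by omega
  have hx2 : X % 2 = 0 := by omega
  rw [h2, hx2, Nat.zero_mul] at hX
  have h3 := and_pred_self_odd (X / 2) (by omega)
  have h4 := Nat.and_le_left (n := X / 2) (m := X / 2 - 1)
  unfold lowb
  omega

lemma lowb_rec (X : ℕ) (h : X % 4 = 0) (h0 : 0 < X) : lowb X = 2 * lowb (X / 2) := by
  have hX : X &&& (X - 1) = 2 * (X / 2 &&& (X - 1) / 2) + X % 2 * ((X - 1) % 2) := and_rec ..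
  have h2 : (X - 1) / 2 = X / 2 - 1 := by omega
  have hx2 : X % 2 = 0 := by omega
  rw [h2, hx2, Nat.zero_mul] at hX
  have h4 := Nat.and_le_left (n := X / 2) (m := X / 2 - 1)
  have h5 := Nat.and_le_left (n := X) (m := X - 1)
  unfold lowb
  omega

lemma lowb_even (X : ℕ) (h : X % 2 = 0) (h0 : 0 < X) : lowb X % 2 = 0 := by
  have h4 : X % 4 = 0 ∨ X % 4 = 2 := by omega
  rcases h4 with h4 | h4
  · rw [lowb_rec X h4 h0]; omega
  · rw [lowb_two X h4]

lemma band_not (m : ℕ) :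
    PySem.Int.band (Int.not (m : ℤ)) ((m : ℤ) + 1) = (lowb (m + 1) : ℤ) := by
  have hnot : Int.not (m : ℤ) = -((m : ℤ) + 1) := by
    show Int.not (Int.ofNat m) = _
    rw [Int.not]
    simp [Int.negSucc_eq]
  rw [hnot, PySem.Int.band, if_neg (by omega), if_pos (by omega)]
  have h1 : (-(-((m:ℤ) + 1)) - 1).toNat = m := by omega
  have h2 : ((m:ℤ) + 1).toNat = m + 1 := by omega
  rw [h1, h2]
  unfold lowb
  have := Nat.and_le_left (n := m + 1) (m := m)
  push_cast [Nat.cast_sub this]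
  norm_num

lemma mod_two_cast (m : ℕ) : PySem.Int.mod (m : ℤ) 2 = ((m % 2 : ℕ) : ℤ) := by
  rw [PySem.Int.mod_eq_emod_of_pos (by norm_num)]
  push_cast
  omega

lemma Aval_eq (m : ℕ) : Aval (m : ℤ) = nextVal (m : ℤ) := by
  induction m using Nat.strong_induction_on with
  | _ m ih =>
  rcases Nat.lt_or_ge m 2 with hm2 | hm2
  · interval_cases m <;> decide
  have hmne : m ≠ 0 := by omega
  rcases Nat.mod_two_eq_zero_or_one m with hpar | hpar
  · -- even: flip the trailing '0'
    simp only [Aval, nextVal]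
    rw [tail_eq, toDigits_two, if_neg hmne]
    have hbm : bits m = bits (m/2) ++ ['0'] := by
      rw [bits_pos (by omega)]; simp [hpar]
    rw [hbm, mod_two_cast, hpar,
      show ('0' :: (bits (m/2) ++ ['0'])) = ('0' :: bits (m/2)) ++ ['0'] from rfl,
      rfind_append_zero]
    simp only [PySem.List.pySetD_natCast, Nat.cast_zero]
    rw [List.set_append_right _ _ le_rfl]
    simp only [Nat.sub_self, List.set_cons_zero]
    rw [if_neg (by norm_num), if_pos (by norm_num), intFromBin2_append,
      intFromBin2_cons_zero, intFromBin2_bits]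
    simp only [beq_self_eq_true, if_true]
    push_cast
    omega
  · -- odd
    have hk1 : 1 ≤ m / 2 := by omega
    rcases Nat.mod_two_eq_zero_or_one (m / 2) with hkpar | hkpar
    · -- m % 4 = 1 : flip the last '0', clear the trailing '1'
      have hq : m = 4 * (m / 4) + 1 := by omega
      simp only [Aval, nextVal]
      rw [tail_eq, toDigits_two, if_neg hmne]
      have hbm : bits m = (bits (m/4) ++ ['0']) ++ ['1'] := by
        rw [bits_pos (by omega), bits_pos (show 0 < m/2 by omega)]
        have : m / 2 / 2 = m / 4 := by omega
        simp [hpar, hkpar, this]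
      rw [hbm, mod_two_cast, hpar,
        show ('0' :: ((bits (m/4) ++ ['0']) ++ ['1'])) =
          (('0' :: bits (m/4)) ++ ['0']) ++ ['1'] from rfl,
        rfind_append_one, rfind_append_zero]
      simp only [Nat.cast_one, beq_self_eq_true, if_true]
      rw [if_neg (by norm_num)]
      rw [show (((('0' :: bits (m/4)).length : ℤ)) + 1) = ((('0' :: bits (m/4)).length + 1 : ℕ) : ℤ) by push_cast; ring]
      simp only [PySem.List.pySetD_natCast]
      rw [List.set_append_left _ _ (by simp), List.set_append_right _ _ le_rfl]
      simp only [Nat.sub_self, List.set_cons_zero]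
      rw [List.set_append_right _ _ (by simp)]
      simp only [List.length_append, List.length_singleton, Nat.sub_self, List.set_cons_zero]
      rw [intFromBin2_append, intFromBin2_append, intFromBin2_cons_zero, intFromBin2_bits]
      rw [band_not, lowb_two _ (by omega), PySem.Int.floordiv_eq_ediv_of_pos (by norm_num)]
      push_cast
      norm_num
      omega
    · -- m % 4 = 3 : recurse on k = m / 2
      have hbk : bits (m/2) = bits (m/2/2) ++ ['1'] := by
        rw [bits_pos (by omega)]; simp [hkpar]
      have hbm : bits m = bits (m/2) ++ ['1'] := by
        rw [bits_pos (by omega)]; simp [hpar]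
      have hsplit : ('0' :: bits (m/2)) = ('0' :: bits (m/2/2)) ++ ['1'] := by
        rw [hbk]; rfl
      have h0i : 0 ≤ PySem.Chars.rfind ('0' :: bits (m/2)) ['0'] := rfind_cons_zero_nonneg _
      have hib : PySem.Chars.rfind ('0' :: bits (m/2)) ['0'] ≤
          ((('0' :: bits (m/2/2)).length : ℤ)) - 1 := by
        rw [hsplit, rfind_append_one]; exact rfind_le _
      have hlen : ('0' :: bits (m/2)).length = ('0' :: bits (m/2/2)).length + 1 := by
        rw [hsplit, List.length_append, List.length_singleton]
      obtain ⟨a, ha⟩ : ∃ a : ℕ, PySem.Chars.rfind ('0' :: bits (m/2)) ['0'] = (a : ℤ) :=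
        ⟨_, (Int.toNat_of_nonneg h0i).symm⟩
      have halt : a + 2 ≤ ('0' :: bits (m/2)).length := by
        rw [hlen]; omega
      have hrec : Aval (m : ℤ) = 2 * Aval ((m/2 : ℕ) : ℤ) + 1 := by
        simp only [Aval]
        rw [tail_eq]
        rw [tail_eq]
        rw [toDigits_two]
        rw [toDigits_two]
        rw [if_neg hmne]
        rw [if_neg (show ¬ (m / 2 = 0) by omega)]
        rw [mod_two_cast]
        rw [mod_two_cast]
        rw [hpar]
        rw [hkpar]
        simp only [Nat.cast_one, beq_self_eq_true, if_true]
        rw [hbm, show ('0' :: (bits (m/2) ++ ['1'])) = ('0' :: bits (m/2)) ++ ['1'] from rfl,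
          rfind_append_one, ha,
          show (((a : ℤ)) + 1) = ((a + 1 : ℕ) : ℤ) by push_cast; ring]
        simp only [PySem.List.pySetD_natCast]
        rw [List.set_append_left _ _ (by omega),
          List.set_append_left _ _ (by rw [List.length_set]; omega),
          intFromBin2_append]
        norm_num
      rw [hrec, ih (m/2) (by omega)]
      simp only [nextVal]
      rw [mod_two_cast, mod_two_cast, hpar, hkpar, if_neg (by norm_num), if_neg (by norm_num)]
      rw [band_not, band_not]
      have hm4 : (m + 1) % 4 = 0 := by omega
      have hl : lowb (m + 1) = 2 * lowb (m / 2 + 1) := by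
        have := lowb_rec (m + 1) hm4 (by omega)
        have h2 : (m + 1) / 2 = m / 2 + 1 := by omega
        rwa [h2] at this
      have hle := lowb_even (m / 2 + 1) (by omega) (by omega)
      rw [hl, PySem.Int.floordiv_eq_ediv_of_pos (by norm_num),
        PySem.Int.floordiv_eq_ediv_of_pos (by norm_num)]
      push_cast
      omega

lemma foldl_body (xs : List Int) (acc : List Int) (h : ∀ n ∈ xs, 0 ≤ n) :
    xs.foldl solutionBody acc = acc ++ xs.map nextVal := by
  induction xs generalizing acc with
  | nil => simp
  | cons x xs ih =>
    have hx : 0 ≤ x := h x (by simp)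
    obtain ⟨m, rfl⟩ := Int.eq_ofNat_of_zero_le hx
    simp only [List.foldl_cons, List.map_cons, solutionBody_eq, Aval_eq]
    rw [ih _ (fun n hn => h n (by simp [hn]))]
    simp

-- ===== VERDICT (by name: the statement is the Claim_ definition above) =====
theorem solution_spec : Claim_equal_solution := by
  intro numbers _ hpre
  unfold Spec_solution solution solution_alt
  exact foldl_body numbers [] hpre
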